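-- pv_equiv track=rewrite | github.com/soyukke/lean-unsolved | scripts/collatz_residue_analysis.py | collatz_residue
-- ===== SOURCE A (Python) =====
-- def collatz_residue(n):
--     """再帰定義に従って計算"""
--     if n == 0:
--         return 0
--     # c(n+1) = if n%2==0 then 4*c(n)+1 else c(n)
--     # つまり c(k) は c(k-1) から計算: c(k) = if (k-1)%2==0 then 4*c(k-1)+1 else c(k-1)
--     prev = collatz_residue(n - 1)
--     if (n - 1) % 2 == 0:  # n-1 が偶数 → n は奇数
--         return 4 * prev + 1
--     else:  # n-1 が奇数 → n は偶数
--         return prev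
-- ===== SOURCE B (Python) =====
-- def collatz_residue(n):
--     """Closed form: c(n) = (4**m - 1) // 3 with m = (n + 1) // 2."""
--     m = (n + 1) // 2
--     return (pow(4, m) - 1) // 3
-- ===== Notes on version B (the rewrite author's own statement) =====
-- stated objective: faster
-- what changed: Replaced the linear recursion c(n)=c(n-1) with a closed form (4^((n+1)//2)-1)/3 computed by built-in fast exponentiation.
import Mathlib
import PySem

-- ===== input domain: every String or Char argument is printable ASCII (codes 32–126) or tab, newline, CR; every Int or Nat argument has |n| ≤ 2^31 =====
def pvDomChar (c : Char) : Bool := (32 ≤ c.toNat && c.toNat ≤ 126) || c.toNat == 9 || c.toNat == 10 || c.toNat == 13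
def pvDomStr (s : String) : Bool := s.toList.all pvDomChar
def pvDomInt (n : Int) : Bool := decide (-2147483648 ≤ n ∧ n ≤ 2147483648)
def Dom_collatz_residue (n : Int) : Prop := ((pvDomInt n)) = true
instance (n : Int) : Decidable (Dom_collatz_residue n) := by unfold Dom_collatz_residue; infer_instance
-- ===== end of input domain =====

-- B replaces A's linear recursion by the closed form (4^((n+1)//2)-1)/3 (objective: faster, asymptotic).

-- ===== PORT A =====
-- A recurses n → n-1 down to 0; on the admitted inputs (0 ≤ n) this is structural recursion on n.toNat.
def collatzGoA : Nat → Int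
  | 0 => 0
  | Nat.succ k =>
      let prev := collatzGoA k
      if ((k : Int)) % 2 == 0 then 4 * prev + 1 else prev

def collatz_residue (n : Int) : Int := collatzGoA n.toNat

-- ===== PORT B =====
def collatz_residue_alt (n : Int) : Int :=
  let m := PySem.Int.floordiv (n + 1) 2
  PySem.Int.floordiv ((4 : Int) ^ m.toNat - 1) 3

-- ===== PRECONDITION & SPEC =====
-- A's recursion never reaches the base case for n < 0 (RecursionError): Pre_ is 0 ≤ n.
def Pre_collatz_residue (n : Int) : Prop := 0 ≤ n
instance (n : Int) : Decidable (Pre_collatz_residue n) := by unfold Pre_collatz_residue; infer_instance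
def pvWitness_collatz_residue : Int := (7)

def Spec_collatz_residue (n : Int) (out : Int) : Prop := out = collatz_residue_alt n
instance (n : Int) (out : Int) : Decidable (Spec_collatz_residue n out) := by unfold Spec_collatz_residue; infer_instance

-- ===== CLAIM =====
def Claim_equal_collatz_residue : Prop := ∀ (n : Int), Dom_collatz_residue n → Pre_collatz_residue n → Spec_collatz_residue n (collatz_residue n)

-- ===== LEMMAS AND PROOFS =====
lemma collatzGoA_closed (k : Nat) : 3 * collatzGoA k = 4 ^ ((k + 1) / 2) - 1 := by
  induction k with
  | zero => simp [collatzGoA]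
  | succ k ih =>
    rcases Nat.even_or_odd k with ⟨j, hj⟩ | ⟨j, hj⟩
    · have hmod : ((k : Int)) % 2 == 0 := by
        subst hj; push_cast
        have : ((j : Int) + j) % 2 = 0 := by omega
        simp [this]
      have hidx : (k + 1 + 1) / 2 = (k + 1) / 2 + 1 := by omega
      simp only [collatzGoA, hmod, if_pos, hidx, pow_succ]
      rw [show (3 : Int) * (4 * collatzGoA k + 1) = 4 * (3 * collatzGoA k) + 3 by ring, ih]
      ring
    · have hmod : (((k : Int)) % 2 == 0) = false := by
        subst hj; push_cast
        have : (2 * (j : Int) + 1) % 2 = 1 := by omega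
        simp [this]
      have hidx : (k + 1 + 1) / 2 = (k + 1) / 2 := by omega
      simp only [collatzGoA, hmod, if_neg, Bool.false_eq_true, not_false_iff, hidx, ih]

theorem collatz_residue_spec : Claim_equal_collatz_residue := by
  intro n _ hpre
  unfold Pre_collatz_residue at hpre
  unfold Spec_collatz_residue collatz_residue collatz_residue_alt
  have hm : PySem.Int.floordiv (n + 1) 2 = ((n.toNat + 1) / 2 : Nat) := by
    rw [show n + 1 = ((n.toNat + 1 : Nat) : Int) by omega]
    exact_mod_cast PySem.Int.floordiv_natCast (n.toNat + 1) 2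
  rw [hm]
  have h3 := collatzGoA_closed n.toNat
  have hfd : PySem.Int.floordiv ((4 : Int) ^ (((n.toNat + 1) / 2 : Nat) : Int).toNat - 1) 3
      = collatzGoA n.toNat := by
    rw [PySem.Int.floordiv_eq_iff_of_pos (by omega)]
    simp only [Int.toNat_natCast]
    omega
  rw [hfd]
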